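-- pv_equiv track=rewrite | github.com/saxxi/ilgregario | utils.py | get_race_labels
-- ===== SOURCE A (Python) =====
-- def race_short(race: dict) -> str:
--     name = race["name"]
--     return "".join(w[0] for w in name.split()[:3]).upper()[:3]
--
-- def get_race_labels(races: list[dict]) -> list[str]:
--     """Return short labels for chart axes, disambiguating any duplicate abbreviations."""
--     shorts = [race_short(r) for r in races]
--     totals: dict[str, int] = {}
--     for s in shorts:
--         totals[s] = totals.get(s, 0) + 1
--     counts: dict[str, int] = {}
--     result = []
--     for s in shorts:
--         if totals[s] > 1:
--             counts[s] = counts.get(s, 0) + 1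
--             result.append(f"{s}{counts[s]}")
--         else:
--             result.append(s)
--     return result
-- ===== SOURCE B (Python) =====
-- def race_short(race: dict) -> str:
--     name = race["name"]
--     return "".join(w[0] for w in name.split()[:3]).upper()[:3]
--
--
-- def get_race_labels(races: list[dict]) -> list[str]:
--     """Return short labels for chart axes, disambiguating any duplicate abbreviations."""
--     shorts = [race_short(r) for r in races]
--     groups: dict[str, list[int]] = {}
--     for i, s in enumerate(shorts):
--         groups.setdefault(s, []).append(i)
--     result = [None] * len(shorts)
--     for s, idxs in groups.items():
--         if len(idxs) == 1:
--             result[idxs[0]] = s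
--         else:
--             for j, i in enumerate(idxs):
--                 result[i] = f"{s}{j + 1}"
--     return result
-- ===== Notes on version B (the rewrite author's own statement) =====
-- stated objective: alternative
-- what changed: Replaced A's count-then-assign double pass over the sequence by a group-index table (short -> list of indices in scan order) followed by scattered writes into a preallocated result: singleton groups get the plain short, larger groups get enumerated suffixes.
import Mathlib
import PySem

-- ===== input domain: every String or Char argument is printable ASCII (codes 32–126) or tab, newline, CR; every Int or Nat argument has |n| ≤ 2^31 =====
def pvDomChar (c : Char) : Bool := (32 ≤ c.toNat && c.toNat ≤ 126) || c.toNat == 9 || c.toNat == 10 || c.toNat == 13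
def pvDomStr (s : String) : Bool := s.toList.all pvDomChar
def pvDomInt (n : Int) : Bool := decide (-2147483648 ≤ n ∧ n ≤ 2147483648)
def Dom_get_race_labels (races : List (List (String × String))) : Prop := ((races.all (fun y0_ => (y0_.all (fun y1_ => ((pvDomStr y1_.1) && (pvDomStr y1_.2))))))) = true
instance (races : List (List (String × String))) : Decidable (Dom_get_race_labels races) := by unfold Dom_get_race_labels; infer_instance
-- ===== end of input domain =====

-- B replaces A's count-then-assign double pass over the sequence by a group-index table
-- (short -> indices in scan order) followed by scattered writes into a preallocated result
-- (objective: alternative decomposition; same asymptotic cost).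

-- ===== PORT A =====
-- shared helper: both Pythons contain the identical race_short; race["name"] is a
-- first-match association-list lookup (KeyError, i.e. a missing key, is excluded by Pre_,
-- so the "" default is never consulted there)
def raceShort (race : List (String × String)) : String :=
  let name := ((race.find? (fun p => p.1 == "name")).map (·.2)).getD ""
  PySem.Str.slice
    (PySem.Str.upper
      (PySem.Str.join ""
        ((PySem.List.slice (PySem.Str.split₀ name) none (some 3)).map
          (fun w => ((PySem.Str.pyGet? w 0).map (fun c => String.ofList [c])).getD ""))))
    none (some 3)

def get_race_labels (races : List (List (String × String))) : List String :=
  let shorts := races.map raceShort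
  let totals : PySem.Dict String Int :=
    shorts.foldl (fun d s => d.insert s (d.getD s 0 + 1)) PySem.Dict.empty
  (shorts.foldl
    (fun (st : PySem.Dict String Int × List String) s =>
      if totals.getD s 0 > 1 then
        let c := st.1.getD s 0 + 1
        (st.1.insert s c, st.2 ++ [s ++ PySem.Int.toStr c])
      else (st.1, st.2 ++ [s]))
    (PySem.Dict.empty, [])).2

-- ===== PORT B =====
-- groups.setdefault(s, []).append(i) mutates the list stored in the dict in place:
-- modelled exactly as Dict.modify s [] (· ++ [i]).  result = [None]*n is a list of
-- Option String; every slot is written by its short's group, so the final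
-- Option.getD "" (bridging Option String to the declared List String) never supplies "".
def get_race_labels_alt (races : List (List (String × String))) : List String :=
  let shorts := races.map raceShort
  let groups : PySem.Dict String (List Int) :=
    (PySem.List.enumerate shorts).foldl
      (fun d p => d.modify p.2 [] (· ++ [p.1])) PySem.Dict.empty
  let res :=
    groups.items.foldl
      (fun (r : List (Option String)) (p : String × List Int) =>
        if p.2.length = 1 then
          PySem.List.pySetD r (PySem.List.pyGetD p.2 0 0) (some p.1)
        else
          (PySem.List.enumerate p.2).foldl
            (fun r q => PySem.List.pySetD r q.2 (some (p.1 ++ PySem.Int.toStr (q.1 + 1)))) r)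
      (List.replicate shorts.length (none : Option String))
  res.map (fun o => o.getD "")

-- ===== PRECONDITION & SPEC =====
-- Pre_ excludes exactly the inputs where race["name"] raises KeyError in A (and in B alike)
def Pre_get_race_labels (races : List (List (String × String))) : Prop :=
  (races.all (fun r => r.any (fun p => p.1 == "name"))) = true
instance (races : List (List (String × String))) : Decidable (Pre_get_race_labels races) := by
  unfold Pre_get_race_labels; infer_instance

def pvWitness_get_race_labels : (List (List (String × String))) :=
  [[("name", "Giro d Italia")], [("name", "Gran duo in")], [("name", "Tour")]]

def Spec_get_race_labels (races : List (List (String × String))) (out : List String) : Prop := out = get_race_labels_alt races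
instance (races : List (List (String × String))) (out : List String) : Decidable (Spec_get_race_labels races out) := by unfold Spec_get_race_labels; infer_instance

-- ===== CLAIM (what is proved, stated in full; the proofs are below) =====
def Claim_equal_get_race_labels : Prop := ∀ (races : List (List (String × String))), Dom_get_race_labels races → Pre_get_race_labels races → Spec_get_race_labels races (get_race_labels races)

-- ===== LEMMAS AND PROOFS =====

-- the common target: each element labelled from its total count and its prefix count
def tgtList (l : List String) : List String :=
  (PySem.List.enumerate l).map (fun p =>
    if PySem.List.count l p.2 = 1 then p.2
    else p.2 ++ PySem.Int.toStr ((PySem.List.count (PySem.List.slice l none (some (p.1 + 1))) p.2 : Nat) : Int))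

-- the loop invariant for A's second pass: walking rest after having consumed pre
-- (shorts = pre ++ rest), with counts-dict c correct on every string of total count > 1,
-- the fold appends exactly the target labels for the enumerated suffix.
lemma loopA_spec (shorts : List String) (rest : List String) :
    ∀ (pre : List String), shorts = pre ++ rest →
    ∀ (c : PySem.Dict String Int),
      (∀ x, 1 < shorts.count x → c.getD x 0 = (pre.count x : Int)) →
    ∀ (res : List String),
    (rest.foldl
      (fun (st : PySem.Dict String Int × List String) s =>
        if (shorts.foldl (fun d s => d.insert s (d.getD s 0 + 1)) (PySem.Dict.empty : PySem.Dict String Int)).getD s 0 > 1 then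
          let cv := st.1.getD s 0 + 1
          (st.1.insert s cv, st.2 ++ [s ++ PySem.Int.toStr cv])
        else (st.1, st.2 ++ [s]))
      (c, res)).2
    = res ++ (PySem.List.enumerate rest (pre.length : Int)).map (fun p =>
        if PySem.List.count shorts p.2 = 1 then p.2
        else p.2 ++ PySem.Int.toStr ((PySem.List.count (PySem.List.slice shorts none (some (p.1 + 1))) p.2 : Nat) : Int)) := by
  induction rest with
  | nil => intro pre _ c _ res; simp [PySem.List.enumerate_nil]
  | cons s rest ih =>
    intro pre hpre c hc res
    have htot : (shorts.foldl (fun d s => d.insert s (d.getD s 0 + 1)) (PySem.Dict.empty : PySem.Dict String Int)).getD s 0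
        = (shorts.count s : Int) := by
      rw [PySem.Dict.getD_foldl_insert_add_one]
      simp [PySem.Dict.getD_empty]
    have hmem : s ∈ shorts := by rw [hpre]; simp
    have hcount1 : 1 ≤ shorts.count s := List.one_le_count_iff.mpr hmem
    have htake : PySem.List.slice shorts none (some ((pre.length : Int) + 1)) = pre ++ [s] := by
      have hcast : ((pre.length : Int) + 1) = ((pre.length + 1 : Nat) : Int) := by push_cast; ring
      rw [hcast, PySem.List.slice_to_natCast, hpre, List.take_append]
      simp
    rw [List.foldl_cons, PySem.List.enumerate_cons]
    by_cases hgt : 1 < shorts.count s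
    · rw [if_pos (by rw [gt_iff_lt, htot]; exact_mod_cast hgt)]
      simp only
      rw [ih (pre ++ [s]) (by simp [hpre]) _
        (by
          intro x hx
          by_cases hxs : x = s
          · subst hxs
            rw [PySem.Dict.getD_insert_self, hc x hx]
            simp
          · rw [PySem.Dict.getD_insert_of_ne _ _ _ hxs, hc x hx]
            simp [List.count_append, Ne.symm hxs])]
      simp only [List.map_cons, List.length_append, List.length_cons, List.length_nil]
      rw [if_neg (by simp only [PySem.List.count]; omega)]
      rw [htake, hc s hgt]
      simp [PySem.List.count, List.count_append]
    · rw [if_neg (by rw [gt_iff_lt, htot]; omega)]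
      simp only
      have heq1 : shorts.count s = 1 := by omega
      rw [ih (pre ++ [s]) (by simp [hpre]) _
        (by
          intro x hx
          have hxs : x ≠ s := by rintro rfl; omega
          rw [hc x hx]
          simp [List.count_append, Ne.symm hxs])]
      simp only [List.map_cons]
      rw [if_pos (by simpa [PySem.List.count] using heq1)]
      simp

lemma A_eq_tgt (races : List (List (String × String))) :
    get_race_labels races = tgtList (races.map raceShort) := by
  unfold get_race_labels tgtList
  have h := loopA_spec (races.map raceShort) (races.map raceShort) [] rfl
    PySem.Dict.empty (by intro x _; simp [PySem.Dict.getD_empty]) []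
  simpa only [List.length_nil, Nat.cast_zero, List.nil_append] using h

-- ---- B-side machinery ----

-- group of a short s: its indices in scan order (the value groups stores under s)
def Gmap (l : List String) (t : Int) (s : String) : List Int :=
  ((PySem.List.enumerate l t).filter (fun p => p.2 == s)).map (·.1)

-- one iteration of B's writing loop
def stepG (r : List (Option String)) (p : String × List Int) : List (Option String) :=
  if p.2.length = 1 then
    PySem.List.pySetD r (PySem.List.pyGetD p.2 0 0) (some p.1)
  else
    (PySem.List.enumerate p.2).foldl
      (fun r q => PySem.List.pySetD r q.2 (some (p.1 ++ PySem.Int.toStr (q.1 + 1)))) r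

-- the value the target assigns to position m whose short is s
def labVal (l : List String) (m : Nat) (s : String) : String :=
  if l.count s = 1 then s
  else s ++ PySem.Int.toStr (((l.take (m + 1)).count s : Nat) : Int)

lemma Gmap_nil (t : Int) (s : String) : Gmap [] t s = [] := rfl

lemma Gmap_cons (x : String) (l : List String) (t : Int) (s : String) :
    Gmap (x :: l) t s = if x = s then t :: Gmap l (t + 1) s else Gmap l (t + 1) s := by
  simp only [Gmap, PySem.List.enumerate_cons, List.filter_cons]
  by_cases h : x = s <;> simp [h]

lemma length_Gmap (l : List String) (t : Int) (s : String) :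
    (Gmap l t s).length = l.count s := by
  induction l generalizing t with
  | nil => simp [Gmap_nil]
  | cons x l ih =>
    rw [Gmap_cons]
    by_cases h : x = s <;> simp [h, ih]

lemma groups_items (l : List String) :
    ((PySem.List.enumerate l).foldl
      (fun d p => d.modify p.2 [] (· ++ [p.1])) PySem.Dict.empty).items
    = (PySem.Set.ofList l).map (fun s => (s, Gmap l 0 s)) := by
  set D := (PySem.List.enumerate l).foldl (fun d p => d.modify p.2 [] (· ++ [p.1]))
    (PySem.Dict.empty : PySem.Dict String (List Int)) with hD
  have hkeys : D.keys = PySem.Set.ofList l := by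
    rw [hD, PySem.Dict.keys_foldl_modify_key (key := fun (p : Int × String) => p.2)
      (d0 := ([] : List Int)) (f := fun _ (p : Int × String) v => v ++ [p.1])]
    rw [PySem.Dict.keys_empty, PySem.List.map_snd_enumerate]
    rw [PySem.Set.ofList_eq_foldl]; rfl
  have hnd : D.keys.Nodup := by rw [hkeys]; exact PySem.Set.nodup_ofList l
  have hget : ∀ s, D.getD s [] = Gmap l 0 s := by
    intro s
    have hswap : D = ((PySem.List.enumerate l).map (fun p => (p.2, p.1))).foldl
        (fun d p => d.modify p.1 [] (· ++ [p.2])) PySem.Dict.empty := by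
      rw [hD, List.foldl_map]
    rw [hswap, PySem.Dict.getD_foldl_modify_append, PySem.Dict.getD_empty]
    simp [Gmap, List.filter_map, List.map_map, Function.comp_def]
  rw [PySem.Dict.items_eq_map_keys D hnd [], hkeys]
  exact List.map_congr_left (fun s _ => by rw [hget s])

-- pointwise effect of the inner (multi-occurrence) writing loop
lemma innerW (s : String) (l : List String) :
    ∀ (t : Nat) (j0 : Int) (res : List (Option String)) (m : Nat),
    ((PySem.List.enumerate (Gmap l (t : Int) s) j0).foldl
       (fun r q => PySem.List.pySetD r q.2 (some (s ++ PySem.Int.toStr (q.1 + 1)))) res)[m]?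
    = if t ≤ m ∧ l[m - t]? = some s ∧ m < res.length
      then some (some (s ++ PySem.Int.toStr (j0 + ((l.take (m - t + 1)).count s : Int))))
      else res[m]? := by
  induction l with
  | nil =>
    intro t j0 res m
    simp [Gmap_nil, PySem.List.enumerate_nil]
  | cons x l ih =>
    intro t j0 res m
    have hc : ((t : Int) + 1) = ((t + 1 : Nat) : Int) := by push_cast; ring
    rw [Gmap_cons]
    by_cases hx : x = s
    · subst hx
      rw [if_pos rfl, hc, PySem.List.enumerate_cons, List.foldl_cons, PySem.List.pySetD_natCast,
        ih (t + 1) (j0 + 1) (res.set t (some (x ++ PySem.Int.toStr (j0 + 1)))) m]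
      rcases lt_trichotomy m t with hmt | hmt | hmt
      · rw [if_neg (by rintro ⟨h, -, -⟩; omega), List.getElem?_set,
          if_neg (show ¬ t = m by omega), if_neg (by rintro ⟨h, -, -⟩; omega)]
      · rw [if_neg (by rintro ⟨h, -, -⟩; omega), List.getElem?_set,
          if_pos (show t = m by omega)]
        by_cases hlen : t < res.length
        · rw [if_pos hlen,
            if_pos (show _ ∧ _ ∧ _ from
              ⟨by omega, by rw [show m - t = 0 by omega]; simp, by omega⟩)]
          rw [show m - t + 1 = 1 by omega]
          norm_num
        · rw [if_neg hlen, if_neg (by rintro ⟨-, -, h3⟩; omega),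
            List.getElem?_eq_none (by omega)]
      · have hms : (x :: l)[m - t]? = l[m - (t + 1)]? := by
          rw [show m - t = (m - (t + 1)) + 1 by omega, List.getElem?_cons_succ]
        rw [List.length_set]
        by_cases hcond : l[m - (t + 1)]? = some x ∧ m < res.length
        · rw [if_pos (show _ ∧ _ ∧ _ from ⟨by omega, hcond.1, hcond.2⟩),
            if_pos (show _ ∧ _ ∧ _ from ⟨by omega, by rw [hms]; exact hcond.1, hcond.2⟩)]
          rw [show m - (t + 1) + 1 = m - t by omega, List.take_succ_cons, List.count_cons_self]
          have harg : (j0 + 1) + ((List.count x (List.take (m - t) l) : Nat) : Int)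
              = j0 + (((List.count x (List.take (m - t) l) + 1 : Nat) : Nat) : Int) := by
            push_cast; ring
          rw [harg]
        · rw [if_neg (by rintro ⟨-, h2, h3⟩; exact hcond ⟨h2, h3⟩),
            List.getElem?_set, if_neg (show ¬ t = m by omega),
            if_neg (by rintro ⟨-, h2, h3⟩; exact hcond ⟨by rw [← hms]; exact h2, h3⟩)]
    · rw [if_neg hx, hc, ih (t + 1) j0 res m]
      rcases lt_trichotomy m t with hmt | hmt | hmt
      · rw [if_neg (by rintro ⟨h, -, -⟩; omega), if_neg (by rintro ⟨h, -, -⟩; omega)]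
      · rw [if_neg (by rintro ⟨h, -, -⟩; omega),
          if_neg (by
            rintro ⟨-, h2, -⟩
            rw [show m - t = 0 by omega] at h2
            simp only [List.getElem?_cons_zero, Option.some.injEq] at h2
            exact hx h2)]
      · have hms : (x :: l)[m - t]? = l[m - (t + 1)]? := by
          rw [show m - t = (m - (t + 1)) + 1 by omega, List.getElem?_cons_succ]
        by_cases hcond : l[m - (t + 1)]? = some s ∧ m < res.length
        · rw [if_pos (show _ ∧ _ ∧ _ from ⟨by omega, hcond.1, hcond.2⟩),
            if_pos (show _ ∧ _ ∧ _ from ⟨by omega, by rw [hms]; exact hcond.1, hcond.2⟩)]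
          rw [show m - (t + 1) + 1 = m - t by omega, List.take_succ_cons, List.count_cons]
          norm_num [hx]
        · rw [if_neg (by rintro ⟨-, h2, h3⟩; exact hcond ⟨h2, h3⟩),
            if_neg (by rintro ⟨-, h2, h3⟩; exact hcond ⟨by rw [← hms]; exact h2, h3⟩)]

-- when the count is 1 the group is a singleton holding the unique position
lemma Gmap_count_one (l : List String) (s : String) :
    ∀ (t : Nat), l.count s = 1 →
    ∃ k, k < l.length ∧ Gmap l (t : Int) s = [((t + k : Nat) : Int)] ∧
      l[k]? = some s ∧ ∀ m, l[m]? = some s → m = k := by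
  induction l with
  | nil => intro t h; simp at h
  | cons x l ih =>
    intro t h
    by_cases hx : x = s
    · subst hx
      have hl0 : l.count x = 0 := by
        have := List.count_cons_self (a := x) (l := l); omega
      have hnil : Gmap l ((t : Int) + 1) x = [] := by
        have := length_Gmap l ((t : Int) + 1) x
        rw [hl0] at this
        exact List.length_eq_zero_iff.mp this
      refine ⟨0, by simp, ?_, by simp, ?_⟩
      · rw [Gmap_cons, if_pos rfl, hnil]; simp
      · intro m hm
        by_contra hne
        have h1 : 1 ≤ m := by omega
        rw [show m = (m - 1) + 1 by omega, List.getElem?_cons_succ] at hm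
        have : x ∈ l := List.mem_of_getElem? hm
        rw [← List.count_pos_iff] at this
        omega
    · have hl1 : l.count s = 1 := by
        rw [List.count_cons, if_neg (by simpa using hx)] at h; omega
      obtain ⟨k, hk, hg, hs, hu⟩ := ih (t + 1) hl1
      have hc : ((t : Int) + 1) = ((t + 1 : Nat) : Int) := by push_cast; ring
      refine ⟨k + 1, by simpa using Nat.succ_lt_succ hk, ?_, by simpa using hs, ?_⟩
      · rw [Gmap_cons, if_neg hx, hc, hg]
        congr 2
        omega
      · intro m hm
        match m with
        | 0 => simp at hm; exact absurd hm hx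
        | m + 1 =>
          rw [List.getElem?_cons_succ] at hm
          exact congrArg (· + 1) (hu m hm)

-- writes preserve length
lemma length_foldl_pySetD {α β : Type} (f : β → Int) (g : β → α) (ps : List β) :
    ∀ (res : List α),
    (ps.foldl (fun r q => PySem.List.pySetD r (f q) (g q)) res).length = res.length := by
  induction ps with
  | nil => intro res; rfl
  | cons p ps ih => intro res; rw [List.foldl_cons, ih, PySem.List.length_pySetD]

lemma length_stepG (r : List (Option String)) (p : String × List Int) :
    (stepG r p).length = r.length := by
  unfold stepG
  by_cases h : p.2.length = 1
  · rw [if_pos h, PySem.List.length_pySetD]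
  · rw [if_neg h]
    exact length_foldl_pySetD (fun (q : Int × Int) => q.2)
      (fun q => some (p.1 ++ PySem.Int.toStr (q.1 + 1))) (PySem.List.enumerate p.2) r

-- pointwise effect of processing one group
lemma stepG_group (shorts : List String) (s : String) (res : List (Option String))
    (hlen : res.length = shorts.length) (hmem : s ∈ shorts) (m : Nat) (hm : m < shorts.length) :
    (stepG res (s, Gmap shorts 0 s))[m]?
    = if shorts[m]? = some s then some (some (labVal shorts m s)) else res[m]? := by
  have hcnt : 1 ≤ shorts.count s := List.one_le_count_iff.mpr hmem
  unfold stepG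
  simp only [length_Gmap]
  by_cases h1 : shorts.count s = 1
  · rw [if_pos h1]
    obtain ⟨k, hk, hg, hs, hu⟩ := Gmap_count_one shorts s 0 h1
    simp only [Nat.zero_add, Nat.cast_zero] at hg
    rw [hg]
    have hidx : PySem.List.pyGetD [((k : Nat) : Int)] 0 0 = (k : Int) := by
      simp [PySem.List.pyGetD_ofNat']
    rw [hidx, PySem.List.pySetD_natCast, List.getElem?_set]
    by_cases hmk : k = m
    · subst hmk
      rw [if_pos rfl, if_pos (by omega), if_pos hs, labVal, if_pos h1]
    · rw [if_neg hmk, if_neg (fun h => hmk (hu m h).symm)]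
  · rw [if_neg h1]
    have hinner := innerW s shorts 0 0 res m
    simp only [Nat.cast_zero] at hinner
    rw [hinner]
    by_cases hc : shorts[m]? = some s
    · rw [if_pos (show _ ∧ _ ∧ _ from ⟨Nat.zero_le m, by simpa using hc, by omega⟩),
        if_pos hc, labVal, if_neg h1]
      simp
    · rw [if_neg (by rintro ⟨-, h2, -⟩; exact hc (by simpa using h2)), if_neg hc]

-- pointwise effect of the whole writing loop over a list of keys
lemma outer_fold (shorts : List String) :
    ∀ (ks : List String) (res : List (Option String)),
    res.length = shorts.length → (∀ s ∈ ks, s ∈ shorts) →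
    ∀ (m : Nat) (hm : m < shorts.length),
    ((ks.map (fun s => (s, Gmap shorts 0 s))).foldl stepG res)[m]?
    = if shorts[m] ∈ ks then some (some (labVal shorts m (shorts[m]))) else res[m]? := by
  intro ks
  induction ks with
  | nil => intro res _ _ m hm; simp
  | cons s ks ih =>
    intro res hlen hsub m hm
    rw [List.map_cons, List.foldl_cons,
      ih (stepG res (s, Gmap shorts 0 s))
        (by rw [length_stepG, hlen]) (fun x hx => hsub x (List.mem_cons_of_mem s hx)) m hm]
    by_cases hks : shorts[m] ∈ ks
    · rw [if_pos hks, if_pos (List.mem_cons_of_mem s hks)]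
    · rw [if_neg hks,
        stepG_group shorts s res hlen (hsub s (List.mem_cons_self ..)) m hm]
      by_cases hse : shorts[m] = s
      · rw [if_pos (by rw [List.getElem?_eq_getElem hm, hse]),
          if_pos (by rw [hse]; exact List.mem_cons_self ..), hse]
      · rw [if_neg (by rw [List.getElem?_eq_getElem hm]; exact fun h => hse (Option.some_injective _ h)),
          if_neg (by simp [hse, hks])]

lemma length_outer {α : Type} (ps : List α) (f : List (Option String) → α → List (Option String))
    (hf : ∀ r p, (f r p).length = r.length) :
    ∀ (res : List (Option String)), (ps.foldl f res).length = res.length := by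
  induction ps with
  | nil => intro res; rfl
  | cons p ps ih => intro res; rw [List.foldl_cons, ih, hf]

lemma B_eq_tgt (races : List (List (String × String))) :
    get_race_labels_alt races = tgtList (races.map raceShort) := by
  unfold get_race_labels_alt
  set shorts := races.map raceShort with hshorts
  simp only
  rw [groups_items shorts]
  have hfold :
      (((PySem.Set.ofList shorts).map (fun s => (s, Gmap shorts 0 s))).foldl
        (fun (r : List (Option String)) (p : String × List Int) =>
          if p.2.length = 1 then
            PySem.List.pySetD r (PySem.List.pyGetD p.2 0 0) (some p.1)
          else
            (PySem.List.enumerate p.2).foldl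
              (fun r q => PySem.List.pySetD r q.2 (some (p.1 ++ PySem.Int.toStr (q.1 + 1)))) r)
        (List.replicate shorts.length (none : Option String)))
      = (((PySem.Set.ofList shorts).map (fun s => (s, Gmap shorts 0 s))).foldl stepG
        (List.replicate shorts.length (none : Option String))) := rfl
  rw [hfold]
  set F := ((PySem.Set.ofList shorts).map (fun s => (s, Gmap shorts 0 s))).foldl stepG
    (List.replicate shorts.length (none : Option String)) with hF
  have hlenF : F.length = shorts.length := by
    rw [hF, length_outer _ stepG length_stepG, List.length_replicate]
  apply List.ext_getElem?
  intro m
  by_cases hm : m < shorts.length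
  · have hpt := outer_fold shorts (PySem.Set.ofList shorts)
      (List.replicate shorts.length (none : Option String))
      (by rw [List.length_replicate]) (fun x hx => (PySem.Set.mem_ofList shorts x).mp hx) m hm
    rw [if_pos ((PySem.Set.mem_ofList shorts _).mpr (List.getElem_mem hm))] at hpt
    have hFm : F[m]? = some (some (labVal shorts m (shorts[m]))) := hpt
    rw [List.getElem?_map, hFm]
    unfold tgtList
    rw [List.getElem?_map, PySem.List.getElem?_enumerate,
      List.getElem?_eq_getElem hm]
    simp only [Option.map_some, Option.getD_some, zero_add]
    have hcast : ((m : Int) + 1) = ((m + 1 : Nat) : Int) := by push_cast; ring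
    rw [hcast, PySem.List.slice_to_natCast]
    unfold labVal
    simp [PySem.List.count]
  · rw [List.getElem?_eq_none (by rw [List.length_map, hlenF]; omega),
      List.getElem?_eq_none (by simp [tgtList, PySem.List.length_enumerate]; omega)]

-- ===== VERDICT (by name: the statement is the Claim_ definition above) =====
theorem get_race_labels_spec : Claim_equal_get_race_labels := by
  intro races _ _
  unfold Spec_get_race_labels
  rw [A_eq_tgt, B_eq_tgt]
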